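-- pv_equiv track=rewrite | github.com/hitesharora1997/docbot-ai | data_ingestion/chunker.py | chunk_by_risk_level
-- ===== SOURCE A (Python) =====
-- def chunk_by_risk_level(documents, metadata_list):
--     grouped_chunks = {
--         "prohibited": [],
--         "high": [],
--         "medium": [],
--         "low": []
--     }
--
--     for doc, metadata in zip(documents, metadata_list):
--         lines = doc.splitlines()
--         for line in lines:
--             if not line.strip():
--                 continue
--             for risk in grouped_chunks.keys():
--                 if line.strip().endswith(risk):
--                     grouped_chunks[risk].append(line)
--                     break
--
--     all_chunks = []
--     all_metadata = []
--
--     for risk, lines in grouped_chunks.items():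
--         if lines:
--             chunk = f"Risk Level: {risk}\n" + "\n".join(lines)
--             all_chunks.append(chunk)
--             all_metadata.append({"risk_level": risk})
--
--     return all_chunks, all_metadata
-- ===== SOURCE B (Python) =====
-- def chunk_by_risk_level(documents, metadata_list):
--     # Flatten all lines first, then build each risk bucket with one filter.
--     all_lines = [line for doc, _md in zip(documents, metadata_list)
--                  for line in doc.splitlines()]
--     all_chunks = []
--     all_metadata = []
--     for risk in ("prohibited", "high", "medium", "low"):
--         bucket = [line for line in all_lines
--                   if line.strip() and line.strip().endswith(risk)]
--         if bucket:
--             all_chunks.append(f"Risk Level: {risk}\n" + "\n".join(bucket))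
--             all_metadata.append({"risk_level": risk})
--     return all_chunks, all_metadata
-- ===== Notes on version B (the rewrite author's own statement) =====
-- stated objective: simpler
-- what changed: Replaces A's per-line classify-with-break into a mutable dict of buckets by a flatten-then-filter decomposition: one flat list of all lines, then for each risk level one comprehension filtering it (correct because no risk keyword is a suffix of another, so each line matches at most one bucket).
import Mathlib
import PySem

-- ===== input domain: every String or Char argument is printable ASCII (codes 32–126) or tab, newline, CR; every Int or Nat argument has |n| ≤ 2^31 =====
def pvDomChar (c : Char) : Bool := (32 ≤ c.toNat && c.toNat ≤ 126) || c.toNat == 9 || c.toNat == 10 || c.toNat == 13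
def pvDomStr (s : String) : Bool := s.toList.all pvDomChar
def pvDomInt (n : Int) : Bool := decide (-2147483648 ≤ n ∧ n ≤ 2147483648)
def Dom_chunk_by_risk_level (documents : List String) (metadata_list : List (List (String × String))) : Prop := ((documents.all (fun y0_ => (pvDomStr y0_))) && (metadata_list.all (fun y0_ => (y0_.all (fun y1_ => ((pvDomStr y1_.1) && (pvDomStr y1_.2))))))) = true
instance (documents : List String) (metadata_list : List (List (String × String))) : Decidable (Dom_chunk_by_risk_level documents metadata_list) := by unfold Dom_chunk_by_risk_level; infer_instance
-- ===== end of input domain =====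

-- B replaces A's per-line classify-with-break into a dict of buckets by a flatten-then-filter
-- decomposition (one filter pass per risk keyword); simpler, same cost.


-- ===== PORT A =====
-- one line of A's inner loop: skip blank lines, append to the first bucket whose key the
-- stripped line ends with ('for risk in grouped_chunks.keys(): … break' = find?)
def pvStepA (g : PySem.Dict String (List String)) (line : String) : PySem.Dict String (List String) :=
  if PySem.Str.strip line = "" then g
  else
    match g.keys.find? (fun risk => PySem.Str.endswith (PySem.Str.strip line) risk) with
    | some risk => g.modify risk [] (fun ls => ls ++ [line])
    | none => g

def chunk_by_risk_level (documents : List String) (metadata_list : List (List (String × String))) : List String × (List (List (String × String))) :=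
  let g0 : PySem.Dict String (List String) :=
    PySem.Dict.ofList [("prohibited", []), ("high", []), ("medium", []), ("low", [])]
  let g := (documents.zip metadata_list).foldl
    (fun g p => (PySem.Str.splitlines p.1).foldl pvStepA g) g0
  g.items.foldl
    (fun acc rl =>
      if rl.2 ≠ [] then
        (acc.1 ++ ["Risk Level: " ++ rl.1 ++ "\n" ++ PySem.Str.join "\n" rl.2],
         acc.2 ++ [[("risk_level", rl.1)]])
      else acc)
    ([], [])

-- ===== PORT B =====
def chunk_by_risk_level_alt (documents : List String) (metadata_list : List (List (String × String))) : List String × (List (List (String × String))) :=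
  let allLines := (documents.zip metadata_list).flatMap (fun p => PySem.Str.splitlines p.1)
  ["prohibited", "high", "medium", "low"].foldl
    (fun acc risk =>
      let bucket := allLines.filter
        (fun line => PySem.Str.strip line ≠ "" && PySem.Str.endswith (PySem.Str.strip line) risk)
      if bucket ≠ [] then
        (acc.1 ++ ["Risk Level: " ++ risk ++ "\n" ++ PySem.Str.join "\n" bucket],
         acc.2 ++ [[("risk_level", risk)]])
      else acc)
    ([], [])

-- ===== PRECONDITION & SPEC =====
def Spec_chunk_by_risk_level (documents : List String) (metadata_list : List (List (String × String))) (out : List String × (List (List (String × String)))) : Prop := out = chunk_by_risk_level_alt documents metadata_list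
instance (documents : List String) (metadata_list : List (List (String × String))) (out : List String × (List (List (String × String)))) : Decidable (Spec_chunk_by_risk_level documents metadata_list out) := by unfold Spec_chunk_by_risk_level; infer_instance

-- ===== CLAIM (what is proved, stated in full; the proofs are below) =====
def Claim_equal_chunk_by_risk_level : Prop := ∀ (documents : List String) (metadata_list : List (List (String × String))), Dom_chunk_by_risk_level documents metadata_list → Spec_chunk_by_risk_level documents metadata_list (chunk_by_risk_level documents metadata_list)

-- ===== LEMMAS AND PROOFS =====

def pvKeys : List String := ["prohibited", "high", "medium", "low"]

def pvPred (risk line : String) : Bool :=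
  PySem.Str.strip line ≠ "" && PySem.Str.endswith (PySem.Str.strip line) risk

-- no risk keyword is a suffix of another, so a stripped line ends with at most one of them
theorem pv_excl (s r r' : String) (hr : r ∈ pvKeys) (hr' : r' ∈ pvKeys) (hne : r ≠ r')
    (h : PySem.Str.endswith s r = true) : PySem.Str.endswith s r' = false := by
  by_contra hc
  have h' : PySem.Str.endswith s r' = true := by
    cases hh : PySem.Str.endswith s r' with
    | true => rfl
    | false => exact absurd hh hc
  have e1 : r.toList <:+ s.toList := by
    rw [PySem.Str.endswith_eq] at h
    exact (PySem.Chars.endswith_iff _ _).mp h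
  have e2 : r'.toList <:+ s.toList := by
    rw [PySem.Str.endswith_eq] at h'
    exact (PySem.Chars.endswith_iff _ _).mp h'
  have hcomp := List.suffix_or_suffix_of_suffix e1 e2
  simp only [pvKeys, List.mem_cons, List.not_mem_nil, or_false] at hr hr'
  rcases hr with rfl | rfl | rfl | rfl <;> rcases hr' with rfl | rfl | rfl | rfl <;>
    first
      | exact hne rfl
      | (rcases hcomp with hx | hx <;> revert hx <;> decide)

theorem pv_step (g : PySem.Dict String (List String)) (line : String)
    (hk : g.keys = pvKeys) :
    (pvStepA g line).keys = pvKeys ∧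
    ∀ r ∈ pvKeys, (pvStepA g line).getD r [] =
      g.getD r [] ++ (if pvPred r line then [line] else []) := by
  unfold pvStepA
  by_cases hb : PySem.Str.strip line = ""
  · simp only [hb]
    refine ⟨hk, fun r _ => ?_⟩
    simp [pvPred, hb]
  · simp only [if_neg hb, hk]
    cases hf : pvKeys.find? (fun risk => PySem.Str.endswith (PySem.Str.strip line) risk) with
    | none =>
      refine ⟨hk, fun r hr => ?_⟩
      have := List.find?_eq_none.mp hf r hr
      simp only [pvPred]
      simp [Bool.not_eq_true] at this
      simp [this]
    | some r0 =>
      have hr0mem : r0 ∈ pvKeys := List.mem_of_find?_eq_some hf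
      have hr0 : PySem.Str.endswith (PySem.Str.strip line) r0 = true := by
        have := List.find?_some hf; simpa using this
      have hcont : g.contains r0 = true := (PySem.Dict.contains_iff_mem_keys g r0).mpr (hk ▸ hr0mem)
      constructor
      · rw [PySem.Dict.keys_modify, PySem.Dict.keys_insert_of_contains g _ hcont, hk]
      · intro r hr
        rw [PySem.Dict.getD_modify]
        by_cases hrr : r = r0
        · subst hrr
          have hr0' := hr0
          simp only [PySem.Str.endswith_eq, PySem.Str.toList_strip] at hr0'
          simp [pvPred, hb, hr0']
        · have hf' : PySem.Str.endswith (PySem.Str.strip line) r = false :=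
            pv_excl _ _ _ hr0mem hr (fun e => hrr e.symm) hr0
          simp only [PySem.Str.endswith_eq, PySem.Str.toList_strip] at hf'
          simp [hrr, pvPred, hf']

theorem pv_fold (L : List String) :
    ∀ g : PySem.Dict String (List String), g.keys = pvKeys →
    (L.foldl pvStepA g).keys = pvKeys ∧
    ∀ r ∈ pvKeys, (L.foldl pvStepA g).getD r [] = g.getD r [] ++ L.filter (pvPred r) := by
  induction L with
  | nil => intro g hk; exact ⟨hk, fun r _ => by simp⟩
  | cons l L ih =>
    intro g hk
    obtain ⟨hk1, hv1⟩ := pv_step g l hk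
    obtain ⟨hk2, hv2⟩ := ih (pvStepA g l) hk1
    refine ⟨hk2, fun r hr => ?_⟩
    rw [List.foldl_cons] at *
    rw [hv2 r hr, hv1 r hr, List.filter_cons]
    by_cases hp : pvPred r l = true <;> simp [hp]

theorem pv_flatten (ps : List (String × List (String × String))) :
    ∀ g, ps.foldl (fun g p => (PySem.Str.splitlines p.1).foldl pvStepA g) g =
      (ps.flatMap (fun p => PySem.Str.splitlines p.1)).foldl pvStepA g := by
  induction ps with
  | nil => intro g; rfl
  | cons p ps ih => intro g; simp [List.flatMap_cons, List.foldl_append, ih]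

-- ===== VERDICT (by name: the statement is the Claim_ definition above) =====
theorem chunk_by_risk_level_spec : Claim_equal_chunk_by_risk_level := by
  intro documents metadata_list _
  unfold Spec_chunk_by_risk_level
  unfold chunk_by_risk_level chunk_by_risk_level_alt
  dsimp only
  rw [pv_flatten]
  have hk0 : (PySem.Dict.ofList ([("prohibited", []), ("high", []), ("medium", []), ("low", [])] : List (String × List String))).keys = pvKeys := by decide
  have hv0 : ∀ r ∈ pvKeys, (PySem.Dict.ofList ([("prohibited", []), ("high", []), ("medium", []), ("low", [])] : List (String × List String))).getD r [] = [] := by decide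
  obtain ⟨hk, hv⟩ := pv_fold ((documents.zip metadata_list).flatMap (fun p => PySem.Str.splitlines p.1)) _ hk0
  have hnd : (((documents.zip metadata_list).flatMap (fun p => PySem.Str.splitlines p.1)).foldl pvStepA
      (PySem.Dict.ofList [("prohibited", []), ("high", []), ("medium", []), ("low", [])])).keys.Nodup := by
    rw [hk]; decide
  rw [PySem.Dict.items_eq_map_keys _ hnd [], hk]
  have hmap : pvKeys.map (fun r => (r, (((documents.zip metadata_list).flatMap (fun p => PySem.Str.splitlines p.1)).foldl pvStepA
      (PySem.Dict.ofList [("prohibited", []), ("high", []), ("medium", []), ("low", [])])).getD r [])) =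
      pvKeys.map (fun r => (r, ((documents.zip metadata_list).flatMap (fun p => PySem.Str.splitlines p.1)).filter (pvPred r))) := by
    apply List.map_congr_left
    intro r hr
    rw [hv r hr, hv0 r hr, List.nil_append]
  rw [hmap, List.foldl_map]
  rfl
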